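-- pv_equiv track=rewrite | github.com/rizvisha/Python | poetry_functions.py | dic
-- ===== SOURCE A (Python) =====
-- def dic(pattern):
--     """(poetry pattern) -> dictionary
--
--     Return a dictionary with rhyme scheme as keys and a list of the indices at
--     which the same key occurs as its value.
--
--     >>>pattern = ([5, 7, 5], ['A', 'B', 'A'])
--     >>>dic(pattern)
--     {'B': [1], 'A': [0, 2]}
--     >>>pattern = ([5, 7, 5, 7, 5], ['A', 'A', 'A', 'B', 'B'])
--     >>>dic(pattern)
--     {'B': [3, 4], 'A': [0, 1, 2]}
--     """
--     d = {}
--     counter = 0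
--     for ch in pattern[1]:
--         if ch not in d:
--             d[ch] = [counter]
--         else:
--             d[ch].append(counter)
--         counter += 1
--     return d
-- ===== SOURCE B (Python) =====
-- def dic(pattern):
--     letters = pattern[1]
--     return {k: [i for i, ch in enumerate(letters) if ch == k]
--             for k in dict.fromkeys(letters)}
-- ===== Notes on version B (the rewrite author's own statement) =====
-- stated objective: alternative
-- what changed: Replaces A's single accumulating dict-building pass (with a manual counter and an in-place append per element) by a two-phase decomposition: dedup the letters with dict.fromkeys, then build the result as a dict comprehension whose value for each key is a per-key filter of enumerate(letters).
import Mathlib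
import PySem

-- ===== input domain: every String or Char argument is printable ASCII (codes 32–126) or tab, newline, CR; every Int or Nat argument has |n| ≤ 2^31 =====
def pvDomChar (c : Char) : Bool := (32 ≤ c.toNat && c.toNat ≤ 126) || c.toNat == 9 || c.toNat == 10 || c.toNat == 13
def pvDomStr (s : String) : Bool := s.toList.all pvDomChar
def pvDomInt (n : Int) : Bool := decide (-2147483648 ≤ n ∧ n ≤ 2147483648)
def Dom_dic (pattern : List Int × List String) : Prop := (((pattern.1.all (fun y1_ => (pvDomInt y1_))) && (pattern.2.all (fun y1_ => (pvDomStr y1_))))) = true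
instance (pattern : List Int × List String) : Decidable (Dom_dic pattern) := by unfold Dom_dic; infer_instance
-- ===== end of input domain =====

-- B builds the dict by dedup + per-key filters instead of A's single accumulating pass; same value, different decomposition.

-- ===== PORT A =====
-- state = (d, counter); 'if ch not in d: d[ch] = [counter] else: d[ch].append(counter)'
def dic (pattern : List Int × List String) : List (String × List Int) :=
  (pattern.2.foldl
    (fun (s : PySem.Dict String (List Int) × Int) ch =>
      (if s.1.contains ch = false then s.1.insert ch [s.2]
       else s.1.modify ch [] (fun l => l ++ [s.2]),
       s.2 + 1))
    (PySem.Dict.empty, 0)).1.items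

-- ===== PORT B =====
-- {k: [i for i, ch in enumerate(letters) if ch == k] for k in dict.fromkeys(letters)}
def dic_alt (pattern : List Int × List String) : List (String × List Int) :=
  (PySem.List.dedup pattern.2).map
    (fun k => (k, ((PySem.List.enumerate pattern.2 0).filter (fun p => p.2 == k)).map (·.1)))

-- ===== PRECONDITION & SPEC =====
def Spec_dic (pattern : List Int × List String) (out : List (String × List Int)) : Prop := out = dic_alt pattern
instance (pattern : List Int × List String) (out : List (String × List Int)) : Decidable (Spec_dic pattern out) := by unfold Spec_dic; infer_instance

-- ===== CLAIM (what is proved, stated in full; the proofs are below) =====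
def Claim_equal_dic : Prop := ∀ (pattern : List Int × List String), Dom_dic pattern → Spec_dic pattern (dic pattern)

-- ===== LEMMAS AND PROOFS =====

-- A's branching fold is the canonical modify-append fold over (letter, index) pairs.
theorem dic_fold_eq_modify (letters : List String) (d : PySem.Dict String (List Int)) (c : Int) :
    (letters.foldl
      (fun (s : PySem.Dict String (List Int) × Int) ch =>
        (if s.1.contains ch = false then s.1.insert ch [s.2]
         else s.1.modify ch [] (fun l => l ++ [s.2]),
         s.2 + 1))
      (d, c)).1
    = ((PySem.List.enumerate letters c).map (fun p => (p.2, p.1))).foldl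
        (fun d p => d.modify p.1 [] (fun l => l ++ [p.2])) d := by
  induction letters generalizing d c with
  | nil => rfl
  | cons ch rest ih =>
      simp only [List.foldl_cons, PySem.List.enumerate_cons, List.map_cons]
      rw [ih]
      congr 1
      by_cases h : d.contains ch = false
      · simp only [h, if_true, PySem.Dict.modify,
          PySem.Dict.getD_of_not_contains _ _ h, List.nil_append]
      · simp [h]

theorem dic_spec_aux (pattern : List Int × List String) : dic pattern = dic_alt pattern := by
  unfold dic dic_alt
  rw [dic_fold_eq_modify]
  have hnodup : (((PySem.List.enumerate pattern.2 0).map (fun p => (p.2, p.1))).foldl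
      (fun d p => d.modify p.1 [] (fun l => l ++ [p.2])) PySem.Dict.empty).keys.Nodup := by
    refine PySem.Dict.nodup_keys_foldl_modify_key _ (fun p => p.1) []
      (fun _ (p : String × Int) l => l ++ [p.2]) PySem.Dict.empty ?_
    simp [PySem.Dict.keys_empty]
  rw [PySem.Dict.items_eq_map_keys _ hnodup []]
  have hkeys : (((PySem.List.enumerate pattern.2 0).map (fun p => (p.2, p.1))).foldl
      (fun d p => d.modify p.1 [] (fun l => l ++ [p.2])) PySem.Dict.empty).keys
      = PySem.List.dedup pattern.2 := by
    rw [PySem.Dict.keys_foldl_modify_key _ (fun p => p.1) []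
      (fun _ (p : String × Int) l => l ++ [p.2]) PySem.Dict.empty]
    simp [PySem.Dict.keys_empty, PySem.List.map_snd_enumerate, List.map_map,
      PySem.List.dedup_eq_ofList, PySem.Set.update_nil_left, Function.comp_def]
  rw [hkeys]
  refine List.map_congr_left (fun k _ => ?_)
  rw [PySem.Dict.getD_foldl_modify_append, PySem.Dict.getD_empty, List.nil_append]
  simp [List.filter_map, List.map_map, Function.comp_def]

-- ===== VERDICT (by name: the statement is the Claim_ definition above) =====
theorem dic_spec : Claim_equal_dic := fun pattern _ => dic_spec_aux pattern
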